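-- pv_equiv track=rewrite | github.com/Fratua/AlwaysClaw | email_parser.py | _find_quoted_sections
-- ===== SOURCE A (Python) =====
-- from typing import Union, Optional, List, Dict, Any, Tuple, BinaryIO
--
-- def _find_quoted_sections(original: str, reply: str) -> List[str]:
--     """Identify quoted sections from original vs reply."""
--     quotes = []
--
--     # Simple approach: find lines not in reply
--     original_lines = original.split('\n')
--     reply_lines = set(reply.split('\n'))
--
--     current_quote = []
--     for line in original_lines:
--         if line not in reply_lines or line.startswith('>'):
--             current_quote.append(line)
--         elif current_quote:
--             quotes.append('\n'.join(current_quote))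
--             current_quote = []
--
--     if current_quote:
--         quotes.append('\n'.join(current_quote))
--
--     return quotes
-- ===== SOURCE B (Python) =====
-- def _find_quoted_sections(original, reply):
--     """Classify each line once, then emit maximal runs of quoted lines."""
--     reply_lines = set(reply.split('\n'))
--     lines = original.split('\n')
--     flags = [line not in reply_lines or line.startswith('>') for line in lines]
--     quotes = []
--     i = 0
--     n = len(lines)
--     while i < n:
--         j = i
--         while j < n and flags[j] == flags[i]:
--             j += 1
--         if flags[i]:
--             quotes.append('\n'.join(lines[i:j]))
--         i = j
--     return quotes
-- ===== Notes on version B (the rewrite author's own statement) =====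
-- stated objective: alternative
-- what changed: Replaces A's accumulator/flush state machine with a classify-then-group pass: each line is mapped to a quoted/unquoted flag once, then maximal same-flag runs are scanned out and only the quoted runs are joined and emitted.
import Mathlib
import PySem

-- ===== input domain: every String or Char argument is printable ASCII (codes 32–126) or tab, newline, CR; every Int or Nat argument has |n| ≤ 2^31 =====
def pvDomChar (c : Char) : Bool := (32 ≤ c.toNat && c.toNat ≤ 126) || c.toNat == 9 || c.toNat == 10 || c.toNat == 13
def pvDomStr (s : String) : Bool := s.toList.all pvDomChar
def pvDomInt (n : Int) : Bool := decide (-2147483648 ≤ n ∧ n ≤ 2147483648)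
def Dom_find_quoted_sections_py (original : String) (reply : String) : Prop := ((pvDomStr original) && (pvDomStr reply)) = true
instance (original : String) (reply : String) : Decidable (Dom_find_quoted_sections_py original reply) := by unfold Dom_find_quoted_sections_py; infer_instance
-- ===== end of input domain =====

-- B replaces A's accumulator/flush state machine with a classify-then-group-runs pass (alternative decomposition, same cost).


-- ===== PORT A =====
-- s.split('\n'): sep is non-empty, so split? always returns some
def pvSplitNL (s : String) : List String := (PySem.Str.split? s "\n").getD []

-- shared predicate: `line not in reply_lines or line.startswith('>')`
def pvFlag (rset : PySem.Set String) (line : String) : Bool :=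
  !(PySem.Set.contains rset line) || PySem.Str.startswith line ">"

-- one iteration of A's for-loop over the state (quotes, current_quote)
def pvStepA (rset : PySem.Set String) (st : List String × List String) (line : String) :
    List String × List String :=
  if pvFlag rset line then (st.1, st.2 ++ [line])
  else if st.2 ≠ [] then (st.1 ++ [PySem.Str.join "\n" st.2], [])
  else st

def find_quoted_sections_py (original : String) (reply : String) : List String :=
  let original_lines := pvSplitNL original
  let reply_lines : PySem.Set String := PySem.Set.ofList (pvSplitNL reply)
  let st := original_lines.foldl (pvStepA reply_lines) ([], [])
  if st.2 ≠ [] then st.1 ++ [PySem.Str.join "\n" st.2] else st.1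

-- ===== PORT B =====
-- scan out maximal runs of equal flags; emit the joined lines of each True-run
def pvRunsB : List (Bool × String) → List String
  | [] => []
  | (f, l) :: rest =>
      let run := l :: ((rest.takeWhile (fun p => p.1 == f)).map Prod.snd)
      let restRuns := pvRunsB (rest.dropWhile (fun p => p.1 == f))
      if f then PySem.Str.join "\n" run :: restRuns else restRuns
  termination_by ps => ps.length
  decreasing_by
    simp only [List.length_cons]
    exact Nat.lt_succ_of_le (List.length_dropWhile_le _ _)

def find_quoted_sections_py_alt (original : String) (reply : String) : List String :=
  let reply_lines : PySem.Set String := PySem.Set.ofList (pvSplitNL reply)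
  let lines := pvSplitNL original
  pvRunsB (lines.map (fun l => (pvFlag reply_lines l, l)))

-- ===== PRECONDITION & SPEC =====
def Spec_find_quoted_sections_py (original : String) (reply : String) (out : List String) : Prop := out = find_quoted_sections_py_alt original reply
instance (original : String) (reply : String) (out : List String) : Decidable (Spec_find_quoted_sections_py original reply out) := by unfold Spec_find_quoted_sections_py; infer_instance

-- ===== CLAIM (what is proved, stated in full; the proofs are below) =====
def Claim_equal_find_quoted_sections_py : Prop := ∀ (original : String) (reply : String), Dom_find_quoted_sections_py original reply → Spec_find_quoted_sections_py original reply (find_quoted_sections_py original reply)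

-- ===== LEMMAS AND PROOFS =====

-- dropping one False-flagged line in front does not change B's output
theorem pvRunsB_false_cons (l : String) (ps : List (Bool × String)) :
    pvRunsB ((false, l) :: ps) = pvRunsB ps := by
  cases ps with
  | nil => simp [pvRunsB]
  | cons p ps' =>
    obtain ⟨f', l'⟩ := p
    cases f' with
    | true => simp [pvRunsB]
    | false =>
      rw [pvRunsB, pvRunsB]
      simp [List.dropWhile]

def pvFinish (st : List String × List String) : List String :=
  if st.2 ≠ [] then st.1 ++ [PySem.Str.join "\n" st.2] else st.1

-- loop invariant relating A's foldl state machine to B's run decomposition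
theorem pvLoop_eq (rset : PySem.Set String) (lines : List String) :
    ∀ (quotes cur : List String),
      pvFinish (lines.foldl (pvStepA rset) (quotes, cur)) =
        if cur = [] then quotes ++ pvRunsB (lines.map (fun l => (pvFlag rset l, l)))
        else quotes ++ [PySem.Str.join "\n" (cur ++ lines.takeWhile (pvFlag rset))]
             ++ pvRunsB ((lines.dropWhile (pvFlag rset)).map (fun l => (pvFlag rset l, l))) := by
  induction lines with
  | nil =>
    intro quotes cur
    cases cur with
    | nil => simp [pvFinish, pvRunsB]
    | cons c cs => simp [pvFinish, pvRunsB]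
  | cons l rest ih =>
    intro quotes cur
    rw [List.foldl_cons]
    by_cases hf : pvFlag rset l = true
    · -- quoted line: appended to the current run
      have hstep : pvStepA rset (quotes, cur) l = (quotes, cur ++ [l]) := by
        simp [pvStepA, hf]
      rw [hstep, ih quotes (cur ++ [l])]
      have hne : cur ++ [l] ≠ [] := by simp
      rw [if_neg hne]
      cases cur with
      | nil =>
        simp only [List.nil_append, List.map_cons]
        rw [pvRunsB]
        simp only [hf]
        rw [List.takeWhile_map, List.dropWhile_map]
        have hcomp : ((fun p : Bool × String => p.1 == true) ∘ fun l => (pvFlag rset l, l))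
            = fun l => pvFlag rset l := by
          funext x; simp
        simp [Function.comp_def]
      | cons c cs =>
        simp [hf, List.append_assoc]
    · -- unquoted line: flush (or keep empty state)
      have hf' : pvFlag rset l = false := by simpa using hf
      cases cur with
      | nil =>
        have hstep : pvStepA rset (quotes, ([] : List String)) l = (quotes, []) := by
          simp [pvStepA, hf']
        rw [hstep, ih quotes [], if_pos rfl, if_pos rfl]
        simp only [List.map_cons, hf']
        rw [pvRunsB_false_cons]
      | cons c cs =>
        have hstep : pvStepA rset (quotes, c :: cs) l
            = (quotes ++ [PySem.Str.join "\n" (c :: cs)], []) := by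
          simp [pvStepA, hf']
        rw [hstep, ih (quotes ++ [PySem.Str.join "\n" (c :: cs)]) [], if_pos rfl]
        rw [if_neg (by simp : (c :: cs : List String) ≠ [])]
        simp only [List.takeWhile_cons, hf', List.dropWhile_cons, Bool.false_eq_true, if_false,
          List.append_nil, List.map_cons, List.append_assoc, List.cons_append, List.nil_append]
        rw [pvRunsB_false_cons]

-- ===== VERDICT (by name: the statement is the Claim_ definition above) =====
theorem find_quoted_sections_py_spec : Claim_equal_find_quoted_sections_py := by
  intro original reply _
  unfold Spec_find_quoted_sections_py find_quoted_sections_py find_quoted_sections_py_alt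
  have h := pvLoop_eq (PySem.Set.ofList (pvSplitNL reply))
      (pvSplitNL original) [] []
  simp only [List.nil_append] at h
  exact h
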